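-- pv_equiv track=rewrite | github.com/ProjectQ-Framework/ProjectQ | projectq/backends/_aqt/_aqt.py | _format_counts
-- ===== SOURCE A (Python) =====
-- def _rearrange_result(input_result, length):
--     bin_input = list(bin(input_result)[2:].rjust(length, '0'))
--     return ''.join(bin_input)[::-1]
--
-- def _format_counts(samples, length):
--     counts = {}
--     for result in samples:
--         h_result = _rearrange_result(result, length)
--         if h_result not in counts:
--             counts[h_result] = 1
--         else:
--             counts[h_result] += 1
--     return dict(sorted(counts.items(), key=lambda item: item[0]))
-- ===== SOURCE B (Python) =====
-- def _rearrange_result(input_result, length):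
--     bin_input = list(bin(input_result)[2:].rjust(length, '0'))
--     return ''.join(bin_input)[::-1]
--
-- def _format_counts(samples, length):
--     keys = sorted(_rearrange_result(r, length) for r in samples)
--     counts = {}
--     i = 0
--     n = len(keys)
--     while i < n:
--         j = i
--         while j < n and keys[j] == keys[i]:
--             j += 1
--         counts[keys[i]] = j - i
--         i = j
--     return counts
-- ===== Notes on version B (the rewrite author's own statement) =====
-- stated objective: alternative
-- what changed: Replaces the incremental hashmap accumulation followed by an item-sort with a sort of all formatted key strings followed by a single two-pointer run-length scan that emits each distinct key with its run length, already in ascending key order.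
import Mathlib
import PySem

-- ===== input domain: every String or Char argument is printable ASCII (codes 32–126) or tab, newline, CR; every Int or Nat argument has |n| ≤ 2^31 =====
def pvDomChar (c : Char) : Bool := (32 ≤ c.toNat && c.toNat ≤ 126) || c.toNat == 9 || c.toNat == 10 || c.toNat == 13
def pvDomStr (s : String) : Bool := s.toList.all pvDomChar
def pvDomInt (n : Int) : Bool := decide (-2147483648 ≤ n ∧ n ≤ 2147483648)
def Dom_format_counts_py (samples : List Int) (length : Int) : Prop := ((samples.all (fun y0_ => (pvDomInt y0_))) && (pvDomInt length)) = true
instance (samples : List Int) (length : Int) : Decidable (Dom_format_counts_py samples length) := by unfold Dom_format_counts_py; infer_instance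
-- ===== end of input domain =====

-- B replaces A's incremental dict accumulation + item-sort by sorting all formatted
-- keys and one run-length scan over the sorted list (objective: alternative).
-- Both ports work on the key as a List Char (Python str comparison = code-point
-- lexicographic = List Char '<', per PySem) and wrap it into a String at the end.

-- ===== PORT A =====
-- shared helper _rearrange_result (used verbatim by both Pythons); returns the
-- formatted string as its character list
def rearrange_result_py (input_result : Int) (length : Int) : List Char :=
  -- bin(input_result)[2:]
  let b := PySem.List.slice (PySem.Int.toBinChars0b input_result) (some 2) none
  -- .rjust(length, '0'): left-pad with '0' to width `length` (exact: no pad if length ≤ len)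
  let bin_input := List.replicate (length - b.length).toNat '0' ++ b
  -- ''.join(list(...))[::-1]: a slice with step -1 is exactly List.reverse
  bin_input.reverse

def format_counts_py (samples : List Int) (length : Int) : List (String × Int) :=
  let counts : PySem.Dict (List Char) Int := samples.foldl (fun d result =>
      let h_result := rearrange_result_py result length
      if d.contains h_result = false then d.insert h_result 1
      else d.insert h_result (d.getD h_result 0 + 1)) PySem.Dict.empty
  let sortedItems := PySem.List.sorted counts.items (fun item => item.1) false
  -- dict(sorted(...)): rebuild a dict from the sorted pairs, return its items
  ((sortedItems.foldl (fun d p => d.insert p.1 p.2) PySem.Dict.empty).items).map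
    (fun p => (String.ofList p.1, p.2))

-- ===== PORT B =====
-- Source B's outer while loop: each step consumes one maximal run of equal keys from
-- the (sorted) remainder and stores its length (j - i = 1 + |takeWhile|)
def run_loop : List (List Char) → PySem.Dict (List Char) Int → PySem.Dict (List Char) Int
  | [], counts => counts
  | k :: rest, counts =>
      run_loop (rest.dropWhile (fun y => y == k))
        (counts.insert k ((1 + (rest.takeWhile (fun y => y == k)).length : Nat) : Int))
termination_by l _ => l.length
decreasing_by
  have := List.length_dropWhile_le (fun y => y == k) rest
  simp; omega

def format_counts_py_alt (samples : List Int) (length : Int) : List (String × Int) :=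
  let keys := samples.map (fun r => rearrange_result_py r length)
  (run_loop (PySem.List.sorted keys (fun x => x) false) PySem.Dict.empty).items.map
    (fun p => (String.ofList p.1, p.2))

-- ===== PRECONDITION & SPEC =====
def Spec_format_counts_py (samples : List Int) (length : Int) (out : List (String × Int)) : Prop := out = format_counts_py_alt samples length
instance (samples : List Int) (length : Int) (out : List (String × Int)) : Decidable (Spec_format_counts_py samples length out) := by unfold Spec_format_counts_py; infer_instance

-- ===== CLAIM (what is proved, stated in full; the proofs are below) =====
def Claim_equal_format_counts_py : Prop := ∀ (samples : List Int) (length : Int), Dom_format_counts_py samples length → Spec_format_counts_py samples length (format_counts_py samples length)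

-- ===== LEMMAS AND PROOFS =====

-- the pure run list (proof-side companion of run_loop, without the dict)
def rl : List (List Char) → List (List Char × Int)
  | [] => []
  | k :: rest =>
      (k, ((1 + (rest.takeWhile (fun y => y == k)).length : Nat) : Int)) ::
        rl (rest.dropWhile (fun y => y == k))
termination_by l => l.length
decreasing_by
  have := List.length_dropWhile_le (fun y => y == k) rest
  simp; omega

-- transfer PySem's order lemmas to the instances the ports elaborate with
theorem sorted_port_eq {α : Type} (xs : List α) (key : α → List Char) :
    PySem.List.sorted xs key false =
    @PySem.List.sorted _ _ List.instLinearOrder.toLT LinearOrder.toDecidableLT xs key false := by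
  congr 1

-- A's accumulation step is exactly the Counter step (when the key is absent, getD is 0)
theorem step_eq_counter_step (length : Int) :
    (fun (d : PySem.Dict (List Char) Int) (result : Int) =>
      let h_result := rearrange_result_py result length
      if d.contains h_result = false then d.insert h_result 1
      else d.insert h_result (d.getD h_result 0 + 1)) =
    (fun d result => d.insert (rearrange_result_py result length)
      (d.getD (rearrange_result_py result length) 0 + 1)) := by
  funext d r
  show (if d.contains (rearrange_result_py r length) = false then _ else _) = _
  by_cases hc : d.contains (rearrange_result_py r length) = false
  · simp [hc, PySem.Dict.getD_of_not_contains d 0 hc]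
  · simp [hc]

-- everything after a maximal run is strictly larger than the run's key
theorem lt_of_mem_dropWhile : ∀ (xs : List (List Char)) (x : List Char),
    xs.Pairwise (· ≤ ·) → (∀ y ∈ xs, x ≤ y) →
    ∀ k ∈ xs.dropWhile (fun y => y == x), x < k := by
  intro xs
  induction xs with
  | nil => intro x _ _ k hk; simp at hk
  | cons y ys ih =>
    intro x hp hle k hk
    rw [List.dropWhile_cons] at hk
    by_cases hb : (y == x) = true
    · rw [if_pos hb] at hk
      exact ih x hp.of_cons (fun z hz => hle z (List.mem_cons_of_mem y hz)) k hk
    · rw [if_neg hb] at hk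
      have hxy : x < y :=
        lt_of_le_of_ne (hle y (List.mem_cons_self)) (fun h => hb (by simp [h]))
      rcases List.mem_cons.mp hk with rfl | hk'
      · exact hxy
      · exact lt_of_lt_of_le hxy ((List.pairwise_cons.mp hp).1 k hk')

-- a maximal run in a sorted list has exactly `count` elements
theorem count_head_sorted (x : List Char) (xs : List (List Char))
    (hp : (x :: xs).Pairwise (· ≤ ·)) :
    (x :: xs).count x = 1 + (xs.takeWhile (fun y => y == x)).length := by
  have hd : ∀ k ∈ xs.dropWhile (fun y => y == x), x < k :=
    lt_of_mem_dropWhile xs x hp.of_cons (fun y hy => (List.pairwise_cons.mp hp).1 y hy)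
  have hsplit : xs.takeWhile (fun y => y == x) ++ xs.dropWhile (fun y => y == x) = xs :=
    List.takeWhile_append_dropWhile
  have htake : (xs.takeWhile (fun y => y == x)).count x
      = (xs.takeWhile (fun y => y == x)).length := by
    refine List.count_eq_length.mpr (fun b hb => ?_)
    have h := List.mem_takeWhile_imp hb
    simp only [beq_iff_eq] at h
    exact h.symm
  have hdrop : (xs.dropWhile (fun y => y == x)).count x = 0 := by
    apply List.count_eq_zero.mpr
    intro hmem
    exact lt_irrefl x (hd x hmem)
  calc (x :: xs).count x = xs.count x + 1 := List.count_cons_self ..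
    _ = ((xs.takeWhile (fun y => y == x)) ++ (xs.dropWhile (fun y => y == x))).count x + 1 := by
        rw [hsplit]
    _ = 1 + (xs.takeWhile (fun y => y == x)).length := by
        rw [List.count_append, htake, hdrop]; omega

-- the run list of a sorted list: strictly increasing keys, same membership,
-- and each key paired with its total count
theorem rl_spec : ∀ (n : Nat) (l : List (List Char)), l.length ≤ n →
    l.Pairwise (· ≤ ·) →
    ((rl l).map Prod.fst).Pairwise (· < ·)
    ∧ (∀ k, k ∈ (rl l).map Prod.fst ↔ k ∈ l)
    ∧ rl l = ((rl l).map Prod.fst).map (fun k => (k, (l.count k : Int))) := by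
  intro n
  induction n with
  | zero =>
    intro l hl _
    have : l = [] := List.eq_nil_of_length_eq_zero (Nat.le_zero.mp hl)
    subst this
    refine ⟨by simp [rl], by simp [rl], by simp [rl]⟩
  | succ m ih =>
    intro l hl hp
    match l with
    | [] => exact ⟨by simp [rl], by simp [rl], by simp [rl]⟩
    | x :: xs =>
      have hled : ∀ y ∈ xs, x ≤ y := (List.pairwise_cons.mp hp).1
      have hd : ∀ k ∈ xs.dropWhile (fun y => y == x), x < k :=
        lt_of_mem_dropWhile xs x hp.of_cons hled
      have hrlen : (xs.dropWhile (fun y => y == x)).length ≤ m := by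
        have := List.length_dropWhile_le (fun y => y == x) xs
        simp at hl; omega
      have hrp : (xs.dropWhile (fun y => y == x)).Pairwise (· ≤ ·) :=
        hp.of_cons.sublist (List.dropWhile_sublist _)
      obtain ⟨ihpw, ihmem, iheq⟩ := ih (xs.dropWhile (fun y => y == x)) hrlen hrp
      have hmem_r : ∀ k ∈ (rl (xs.dropWhile (fun y => y == x))).map Prod.fst, x < k :=
        fun k hk => hd k ((ihmem k).mp hk)
      refine ⟨?_, ?_, ?_⟩
      · rw [rl]
        simpa using List.pairwise_cons.mpr ⟨fun k hk => hmem_r k hk, ihpw⟩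
      · intro k
        rw [rl]
        simp only [List.map_cons, List.mem_cons, ihmem]
        constructor
        · rintro (rfl | hk)
          · exact Or.inl rfl
          · exact Or.inr ((List.dropWhile_sublist _).mem hk)
        · rintro (rfl | hk)
          · exact Or.inl rfl
          · by_cases hkx : k = x
            · exact Or.inl hkx
            · refine Or.inr ?_
              rw [← List.takeWhile_append_dropWhile
                    (p := fun y => y == x) (l := xs)] at hk
              rcases List.mem_append.mp hk with h1 | h2
              · have h := List.mem_takeWhile_imp h1
                simp only [beq_iff_eq] at h
                exact absurd h hkx
              · exact h2
      · rw [rl]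
        simp only [List.map_cons]
        congr 1
        · congr 1
          rw [count_head_sorted x xs hp]
        · have hcnt : ∀ k ∈ (rl (xs.dropWhile (fun y => y == x))).map Prod.fst,
              (x :: xs).count k = (xs.dropWhile (fun y => y == x)).count k := by
            intro k hk
            have hxk : x < k := hmem_r k hk
            have hk_ne : k ≠ x := fun h => lt_irrefl x (h ▸ hxk)
            have htk : (xs.takeWhile (fun y => y == x)).count k = 0 := by
              apply List.count_eq_zero.mpr
              intro hmem
              have h := List.mem_takeWhile_imp hmem
              simp only [beq_iff_eq] at h
              exact hk_ne h
            rw [List.count_cons_of_ne (Ne.symm hk_ne),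
              ← List.takeWhile_append_dropWhile (p := fun y => y == x) (l := xs),
              List.count_append, htk]
            simp
          have hmap : ((rl (xs.dropWhile (fun y => y == x))).map Prod.fst).map
                (fun k => (k, ((x :: xs).count k : Int)))
              = ((rl (xs.dropWhile (fun y => y == x))).map Prod.fst).map
                (fun k => (k, ((xs.dropWhile (fun y => y == x)).count k : Int))) :=
            List.map_eq_map_iff.mpr (fun k hk => by rw [hcnt k hk])
          rw [hmap]
          exact iheq

-- Source B's loop appends one dict entry per run: its items are exactly the run list
theorem run_loop_items : ∀ (n : Nat) (l : List (List Char))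
    (d : PySem.Dict (List Char) Int), l.length ≤ n → l.Pairwise (· ≤ ·) →
    (∀ k ∈ l, d.contains k = false) →
    (run_loop l d).items = d.items ++ rl l := by
  intro n
  induction n with
  | zero =>
    intro l d hl _ _
    have : l = [] := List.eq_nil_of_length_eq_zero (Nat.le_zero.mp hl)
    subst this
    simp [run_loop, rl]
  | succ m ih =>
    intro l d hl hp hfresh
    match l with
    | [] => simp [run_loop, rl]
    | x :: xs =>
      have hled : ∀ y ∈ xs, x ≤ y := (List.pairwise_cons.mp hp).1
      have hd : ∀ k ∈ xs.dropWhile (fun y => y == x), x < k :=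
        lt_of_mem_dropWhile xs x hp.of_cons hled
      have hrlen : (xs.dropWhile (fun y => y == x)).length ≤ m := by
        have := List.length_dropWhile_le (fun y => y == x) xs
        simp at hl; omega
      have hrp : (xs.dropWhile (fun y => y == x)).Pairwise (· ≤ ·) :=
        hp.of_cons.sublist (List.dropWhile_sublist _)
      have hfresh' : ∀ k ∈ xs.dropWhile (fun y => y == x),
          (d.insert x ((1 + (xs.takeWhile (fun y => y == x)).length : Nat) : Int)).contains k
            = false := by
        intro k hk
        rw [PySem.Dict.contains_insert]
        have hk_ne : (k == x) = false := by
          simp only [beq_eq_false_iff_ne]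
          exact fun h => lt_irrefl x (h ▸ hd k hk)
        have hk_mem : k ∈ x :: xs :=
          List.mem_cons_of_mem x ((List.dropWhile_sublist _).mem hk)
        rw [hk_ne, hfresh k hk_mem]
        rfl
      rw [run_loop, ih _ _ hrlen hrp hfresh',
        PySem.Dict.items_insert_of_not_contains d _ (hfresh x List.mem_cons_self), rl]
      simp

-- sorting A's counter items by key gives B's run list over the sorted keys
theorem sorted_counter_items (keys : List (List Char)) :
    PySem.List.sorted (PySem.Dict.counter keys).items (fun item => item.1) false =
    rl (PySem.List.sorted keys (fun x => x) false) := by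
  set S := PySem.List.sorted keys (fun x => x) false with hS
  have hSp : S.Pairwise (· ≤ ·) := by
    rw [hS, sorted_port_eq]
    exact PySem.List.sorted_pairwise keys (fun x => x)
  have hSperm : S.Perm keys := PySem.List.sorted_perm keys (fun x => x) false
  obtain ⟨hpw, hmem, heq⟩ := rl_spec S.length S le_rfl hSp
  -- the run list is exactly keys.count on its own (strictly increasing) key list
  have heq' : rl S = ((rl S).map Prod.fst).map (fun k => (k, (keys.count k : Int))) :=
    heq.trans (List.map_eq_map_iff.mpr (fun k _ => by rw [hSperm.count_eq]))
  have hperm : (rl S).Perm (PySem.Dict.counter keys).items := by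
    rw [PySem.Dict.items_counter, heq']
    apply List.Perm.map
    apply (List.perm_ext_iff_of_nodup ?_ (PySem.Set.nodup_ofList keys)).mpr
    · intro a
      rw [hmem a, PySem.Set.mem_ofList, hSperm.mem_iff]
    · exact hpw.imp (fun h => ne_of_lt h)
  have hpw' : (rl S).Pairwise (fun a b : List Char × Int => a.1 < b.1) :=
    (List.pairwise_map.mp hpw).imp (fun h => h)
  convert PySem.List.sorted_eq_of_perm_of_pairwise_lt _ _ _ hperm hpw' using 2

-- ===== VERDICT (by name: the statement is the Claim_ definition above) =====
theorem format_counts_py_spec : Claim_equal_format_counts_py := by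
  intro samples length _
  simp only [Spec_format_counts_py, format_counts_py, format_counts_py_alt]
  set keys := samples.map (fun r => rearrange_result_py r length) with hkeys
  set S := PySem.List.sorted keys (fun x => x) false with hS
  have hSp : S.Pairwise (· ≤ ·) := by
    rw [hS, sorted_port_eq]
    exact PySem.List.sorted_pairwise keys (fun x => x)
  have hfold : samples.foldl (fun d result =>
      let h_result := rearrange_result_py result length
      if d.contains h_result = false then d.insert h_result 1
      else d.insert h_result (d.getD h_result 0 + 1)) PySem.Dict.empty
      = PySem.Dict.counter keys := by
    rw [step_eq_counter_step length,
      ← PySem.Dict.foldl_insert_getD_add_one_eq_counter, hkeys, List.foldl_map]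
  have hB : (run_loop S PySem.Dict.empty).items = rl S := by
    rw [run_loop_items S.length S PySem.Dict.empty le_rfl hSp
      (fun k _ => PySem.Dict.contains_empty k)]
    rfl
  have hA : ((PySem.List.sorted (PySem.Dict.counter keys).items (fun item => item.1)
      false).foldl (fun d p => d.insert p.1 p.2) PySem.Dict.empty).items = rl S := by
    rw [sorted_counter_items keys, ← hS]
    -- rebuilding a dict from pairs with strictly increasing (hence fresh) keys keeps them
    obtain ⟨hpw, _, _⟩ := rl_spec S.length S le_rfl hSp
    have hnd : ((rl S).map Prod.fst).Nodup := hpw.imp (fun h => ne_of_lt h)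
    have := PySem.Dict.items_foldl_insert_fresh
      (l := rl S) (k := Prod.fst) (v := Prod.snd) (d := PySem.Dict.empty)
      (fun a _ => PySem.Dict.contains_empty a.1) hnd
    simpa using this
  rw [hfold, hA, ← hB]
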